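-- pv_equiv track=rewrite | github.com/Ailuropoda1864/adventofcode | 2019/day7.py | get_setting_combinations
-- ===== SOURCE A (Python) =====
-- def get_setting_combinations(start, end):
--     seqs = []
--     choices = range(start, end + 1)
--     for a in choices:
--         for b in choices:
--             for c in choices:
--                 for d in choices:
--                     for e in choices:
--                         if len({a, b, c, d, e}) == 5:
--                             seqs.append((a, b, c, d, e))
--     return seqs
-- ===== SOURCE B (Python) =====
-- def _extend(choices, path):
--     if len(path) == 5:
--         return [path]
--     out = []
--     for v in choices:
--         if v not in path:
--             out.extend(_extend(choices, path + (v,)))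
--     return out
--
--
-- def get_setting_combinations(start, end):
--     return _extend(range(start, end + 1), ())
-- ===== Notes on version B (the rewrite author's own statement) =====
-- stated objective: alternative
-- what changed: Replaces the five nested loops over the full range with a set-size filter at the bottom by a recursive backtracking enumerator that concatenates the results of each not-yet-used choice, pruning invalid branches instead of filtering complete tuples.
import Mathlib
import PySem

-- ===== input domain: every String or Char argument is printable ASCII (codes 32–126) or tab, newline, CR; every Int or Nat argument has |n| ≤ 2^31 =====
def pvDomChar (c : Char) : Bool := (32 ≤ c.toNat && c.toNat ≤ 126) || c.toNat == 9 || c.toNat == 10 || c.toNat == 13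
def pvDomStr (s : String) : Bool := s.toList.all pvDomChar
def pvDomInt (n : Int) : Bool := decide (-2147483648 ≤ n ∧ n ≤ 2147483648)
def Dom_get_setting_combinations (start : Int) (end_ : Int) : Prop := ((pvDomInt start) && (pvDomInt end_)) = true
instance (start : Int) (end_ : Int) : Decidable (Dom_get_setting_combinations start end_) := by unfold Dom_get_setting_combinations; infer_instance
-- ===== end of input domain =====

-- B replaces A's five nested full-range loops (filtering non-distinct tuples at the bottom)
-- by a recursive backtracking enumerator that skips already-used values (alternative algorithm).


-- ===== PORT A =====
-- five nested 'for' loops over choices, appending when the 5 values form a 5-element set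
def get_setting_combinations (start : Int) (end_ : Int) : List (List Int) :=
  let choices := PySem.List.pyRange start (end_ + 1) 1
  choices.foldl (fun seqs a =>
    choices.foldl (fun seqs b =>
      choices.foldl (fun seqs c =>
        choices.foldl (fun seqs d =>
          choices.foldl (fun seqs e =>
            if PySem.Set.len (PySem.Set.ofList [a, b, c, d, e]) = 5 then
              seqs ++ [[a, b, c, d, e]]
            else seqs) seqs) seqs) seqs) seqs) []

-- ===== PORT B =====
-- _extend(choices, path): emit [path] at length 5, else concatenate the recursive results
-- of each not-yet-used choice in order ('out.extend' = flatMap; fuel = 5 - len(path):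
-- the Python checks len(path) == 5, the port counts the remaining slots for termination)
def pvBacktrack (choices : List Int) : List Int → Nat → List (List Int)
  | path, 0 => [path]
  | path, n + 1 =>
      choices.flatMap (fun v => if v ∈ path then [] else pvBacktrack choices (path ++ [v]) n)

def get_setting_combinations_alt (start : Int) (end_ : Int) : List (List Int) :=
  pvBacktrack (PySem.List.pyRange start (end_ + 1) 1) [] 5

-- ===== PRECONDITION & SPEC =====
def Spec_get_setting_combinations (start : Int) (end_ : Int) (out : List (List Int)) : Prop := out = get_setting_combinations_alt start end_
instance (start : Int) (end_ : Int) (out : List (List Int)) : Decidable (Spec_get_setting_combinations start end_ out) := by unfold Spec_get_setting_combinations; infer_instance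

-- ===== CLAIM (what is proved, stated in full; the proofs are below) =====
def Claim_equal_get_setting_combinations : Prop := ∀ (start : Int) (end_ : Int), Dom_get_setting_combinations start end_ → Spec_get_setting_combinations start end_ (get_setting_combinations start end_)

-- ===== LEMMAS AND PROOFS =====

-- A-side abstraction: n more nested loops over choices with prefix 'path', set-size test at the bottom
def pvAGo (choices : List Int) : List Int → Nat → List (List Int)
  | path, 0 => if PySem.Set.len (PySem.Set.ofList path) = 5 then [path] else []
  | path, n + 1 => choices.flatMap (fun v => pvAGo choices (path ++ [v]) n)

theorem pv_not_nodup_append (path : List Int) (v : Int) (h : v ∈ path) :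
    ¬ (path ++ [v]).Nodup := fun hN =>
  (List.nodup_append.mp hN).2.2 v h v (by simp) rfl

theorem pv_nodup_append (path : List Int) (v : Int) (hnd : path.Nodup) (h : v ∉ path) :
    (path ++ [v]).Nodup :=
  List.nodup_append.mpr ⟨hnd, List.nodup_singleton v, fun a ha b hb => by
    simp only [List.mem_singleton] at hb; subst hb; exact fun he => h (he ▸ ha)⟩

theorem pv_foldl_add_length_le (l : List Int) : ∀ acc : List Int,
    (List.foldl PySem.Set.add acc l).length ≤ acc.length + l.length := by
  induction l with
  | nil => simp
  | cons x xs ih =>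
      intro acc
      simp only [List.foldl_cons]
      refine le_trans (ih (PySem.Set.add acc x)) ?_
      by_cases h : x ∈ acc
      · simp [PySem.Set.add, h]
      · simp [PySem.Set.add, h]; omega

theorem pv_foldl_add_length_eq_iff (l : List Int) : ∀ acc : List Int, acc.Nodup →
    ((List.foldl PySem.Set.add acc l).length = acc.length + l.length ↔ (acc ++ l).Nodup) := by
  induction l with
  | nil => intro acc h; simpa using h
  | cons x xs ih =>
      intro acc hacc
      simp only [List.foldl_cons]
      by_cases hx : x ∈ acc
      · have hadd : PySem.Set.add acc x = acc := by simp [PySem.Set.add, hx]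
        rw [hadd]
        constructor
        · intro hlen
          have := pv_foldl_add_length_le xs acc
          simp only [List.length_cons] at hlen
          omega
        · intro hnd
          exact absurd ((List.nodup_append.mp hnd).2.2 x hx x (by simp) rfl) (fun h => h)
      · have hadd : PySem.Set.add acc x = acc ++ [x] := by simp [PySem.Set.add, hx]
        rw [hadd]
        have hnd : (acc ++ [x]).Nodup := pv_nodup_append acc x hacc hx
        have h2 := ih (acc ++ [x]) hnd
        rw [show acc ++ x :: xs = acc ++ [x] ++ xs from (List.append_assoc acc [x] xs).symm, ← h2]
        simp only [List.length_append, List.length_cons, List.length_nil]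
        omega

theorem pv_setLen_eq_iff (l : List Int) :
    (PySem.Set.len (PySem.Set.ofList l) = (l.length : Int)) ↔ l.Nodup := by
  have h := pv_foldl_add_length_eq_iff l [] (by simp)
  simp only [List.nil_append, List.length_nil, Nat.zero_add] at h
  rw [PySem.Set.len, PySem.Set.ofList]
  constructor
  · intro he; exact h.mp (by exact_mod_cast he)
  · intro hn; exact_mod_cast h.mpr hn

theorem pvAGo_not_nodup (choices : List Int) :
    ∀ (n : Nat) (path : List Int), path.length + n = 5 → ¬ path.Nodup →
      pvAGo choices path n = [] := by
  intro n
  induction n with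
  | zero =>
      intro path hlen hnd
      have h5 : (path.length : Int) = 5 := by omega
      have hcond : ¬ PySem.Set.len (PySem.Set.ofList path) = 5 := by
        rw [← h5, pv_setLen_eq_iff]; exact hnd
      simp only [pvAGo]
      rw [if_neg hcond]
  | succ n ih =>
      intro path hlen hnd
      simp only [pvAGo]
      have h : ∀ v : Int, pvAGo choices (path ++ [v]) n = [] := by
        intro v
        apply ih _ (by simp; omega)
        intro hcontra
        exact hnd (hcontra.sublist (List.sublist_append_left path [v]))
      simp [h]

theorem pvAGo_eq_backtrack (choices : List Int) :
    ∀ (n : Nat) (path : List Int), path.length + n = 5 → path.Nodup →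
      pvAGo choices path n = pvBacktrack choices path n := by
  intro n
  induction n with
  | zero =>
      intro path hlen hnd
      have h5 : (path.length : Int) = 5 := by omega
      have hcond : PySem.Set.len (PySem.Set.ofList path) = 5 := by
        rw [← h5, pv_setLen_eq_iff]; exact hnd
      simp only [pvAGo, pvBacktrack]
      rw [if_pos hcond]
  | succ n ih =>
      intro path hlen hnd
      simp only [pvAGo, pvBacktrack]
      congr 1
      funext v
      by_cases hv : v ∈ path
      · have hnd' := pv_not_nodup_append path v hv
        simp [hv, pvAGo_not_nodup choices n (path ++ [v]) (by simp; omega) hnd']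
      · have hnd' := pv_nodup_append path v hnd hv
        simp [hv, ih (path ++ [v]) (by simp; omega) hnd']

theorem pv_filter_map_eq_flatMap (l : List Int) (p : Int → Prop) [DecidablePred p]
    (f : Int → List Int) :
    (List.filter (fun x => decide (p x)) l).map f = l.flatMap (fun x => if p x then [f x] else []) := by
  induction l with
  | nil => simp
  | cons x xs ih => by_cases h : p x <;> simp [h, ih]

theorem pvA_eq_aGo (start end_ : Int) :
    get_setting_combinations start end_ = pvAGo (PySem.List.pyRange start (end_ + 1) 1) [] 5 := by
  simp only [get_setting_combinations, pvAGo, PySem.List.foldl_append_ite,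
    PySem.List.foldl_append_eq_flatMap, List.nil_append, pv_filter_map_eq_flatMap, List.cons_append]

-- ===== VERDICT (by name: the statement is the Claim_ definition above) =====
theorem get_setting_combinations_spec : Claim_equal_get_setting_combinations := by
  intro start end_ _
  unfold Spec_get_setting_combinations get_setting_combinations_alt
  rw [pvA_eq_aGo, pvAGo_eq_backtrack _ 5 [] (by simp) (by simp)]
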